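-- pv_equiv track=rewrite | github.com/khuang428/CSE101 | homework4/homework4.py | updown_encrypt
-- ===== SOURCE A (Python) =====
-- def updown_encrypt(plaintext, num_rows):
--     if num_rows < 0:
--         return plaintext
--     if len(plaintext) == 0:
--         return '%' * num_rows
--     if len(plaintext) % num_rows == 0:
--         num_col = len(plaintext) // num_rows
--     else:
--         num_col = (len(plaintext) // num_rows) + 1
--     grid = [[] for i in range(num_rows)]
--     for c in range(num_col):
--         if c % 2 == 0:
--             for n in range(num_rows):
--                 if len(plaintext) == 0:
--                     grid[n].insert(c,'%')
--                 else:
--                     grid[n].insert(c,plaintext[0])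
--                     plaintext = plaintext[1:]
--         else:
--             for n in range(num_rows):
--                 if len(plaintext) == 0:
--                     grid[num_rows - 1 - n].insert(c,'%')
--                 else:
--                     #rows = num_rows - n
--                     grid[num_rows - 1 - n].insert(c,plaintext[0])
--                     plaintext = plaintext[1:]
--     retW = ''
--     for i in range(num_rows):
--         for j in range(num_col):
--             retW += grid[i][j]
--     return retW
-- ===== SOURCE B (Python) =====
-- def updown_encrypt(plaintext, num_rows):
--     if num_rows < 0:
--         return plaintext
--     n = len(plaintext)
--     if n == 0:
--         return '%' * num_rows
--     num_col = (n + num_rows - 1) // num_rows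
--     padded = plaintext + '%' * (num_rows * num_col - n)
--     out = []
--     for i in range(num_rows):
--         for c in range(num_col):
--             idx = c * num_rows + (i if c % 2 == 0 else num_rows - 1 - i)
--             out.append(padded[idx])
--     return ''.join(out)
-- ===== Notes on version B (the rewrite author's own statement) =====
-- stated objective: faster
-- what changed: B drops A's grid construction (per-character string slicing and per-cell list inserts over num_col passes) and instead computes, in a single pass over the output cells, each cell's index into the '%'-padded plaintext directly, joining the characters at the end.
import Mathlib
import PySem

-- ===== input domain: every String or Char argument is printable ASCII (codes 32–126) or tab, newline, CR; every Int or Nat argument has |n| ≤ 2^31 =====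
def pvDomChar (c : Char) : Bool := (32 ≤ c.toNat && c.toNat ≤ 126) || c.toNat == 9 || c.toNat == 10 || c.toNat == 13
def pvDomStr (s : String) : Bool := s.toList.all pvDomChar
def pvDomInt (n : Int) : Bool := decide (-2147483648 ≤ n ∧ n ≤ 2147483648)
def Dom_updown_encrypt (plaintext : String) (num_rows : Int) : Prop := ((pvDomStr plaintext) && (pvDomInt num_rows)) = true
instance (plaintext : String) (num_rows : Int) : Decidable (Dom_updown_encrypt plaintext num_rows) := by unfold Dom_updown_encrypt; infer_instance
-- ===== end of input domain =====

-- B replaces A's quadratic grid-building (repeated string slicing and list inserts) by computing each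
-- output cell's index in the padded text directly, one pass over the output; equivalence proved on
-- Pre_ (num_rows ≠ 0 or empty plaintext; A raises ZeroDivisionError otherwise).

-- ===== PORT A =====
-- one inner-loop body of A: take the next plaintext char (or '%' when exhausted) and insert it
-- at position c of grid row `row`
def pvFillStep (c row : Nat) (st : List (List Char) × List Char) : List (List Char) × List Char :=
  match st.2 with
  | [] => (st.1.set row (PySem.List.insert (st.1.getD row []) (c : Int) '%'), [])
  | a :: rest => (st.1.set row (PySem.List.insert (st.1.getD row []) (c : Int) a), rest)

-- one column of A's fill loop: downward for even c, upward for odd c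
def pvColStep (R : Nat) (st : List (List Char) × List Char) (c : Nat) : List (List Char) × List Char :=
  if c % 2 = 0 then
    (List.range R).foldl (fun st n => pvFillStep c n st) st
  else
    (List.range R).foldl (fun st n => pvFillStep c (R - 1 - n) st) st

def updown_encrypt (plaintext : String) (num_rows : Int) : String :=
  if num_rows < 0 then plaintext
  else if plaintext.toList.length = 0 then String.mk (List.replicate num_rows.toNat '%')
  else
    let pt := plaintext.toList
    let num_col : Nat :=
      (if PySem.Int.mod (PySem.List.len pt) num_rows = 0 then
         PySem.Int.floordiv (PySem.List.len pt) num_rows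
       else PySem.Int.floordiv (PySem.List.len pt) num_rows + 1).toNat
    let R := num_rows.toNat
    let res := (List.range num_col).foldl (pvColStep R) (List.replicate R [], pt)
    String.mk ((List.range R).foldl (fun acc (i : Nat) =>
      (List.range num_col).foldl (fun acc (j : Nat) =>
        acc ++ [PySem.List.pyGetD (PySem.List.pyGetD res.1 ((i : Nat) : Int) []) ((j : Nat) : Int) '%']) acc) [])

-- ===== PORT B =====
def updown_encrypt_alt (plaintext : String) (num_rows : Int) : String :=
  if num_rows < 0 then plaintext
  else
    let n := plaintext.toList.length
    if n = 0 then String.mk (List.replicate num_rows.toNat '%')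
    else
      let R := num_rows.toNat
      let C := (PySem.Int.floordiv ((n : Int) + num_rows - 1) num_rows).toNat
      let padded := plaintext.toList ++ List.replicate (R * C - n) '%'
      String.mk ((List.range R).foldl (fun acc (i : Nat) =>
        (List.range C).foldl (fun acc (c : Nat) =>
          acc ++ [PySem.List.pyGetD padded
            ((c * R + (if c % 2 = 0 then i else R - 1 - i) : Nat) : Int) '%']) acc) [])

-- ===== PRECONDITION & SPEC =====
-- Pre_ excludes only num_rows = 0 with nonempty plaintext, where A raises ZeroDivisionError
-- (len(plaintext) % num_rows); B raises there too.
def Pre_updown_encrypt (plaintext : String) (num_rows : Int) : Prop :=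
  num_rows ≠ 0 ∨ plaintext.toList.length = 0
instance (plaintext : String) (num_rows : Int) : Decidable (Pre_updown_encrypt plaintext num_rows) := by
  unfold Pre_updown_encrypt; infer_instance
def pvWitness_updown_encrypt : String × Int := ("abcde", 2)

def Spec_updown_encrypt (plaintext : String) (num_rows : Int) (out : String) : Prop := out = updown_encrypt_alt plaintext num_rows
instance (plaintext : String) (num_rows : Int) (out : String) : Decidable (Spec_updown_encrypt plaintext num_rows out) := by unfold Spec_updown_encrypt; infer_instance

-- ===== CLAIM (what is proved, stated in full; the proofs are below) =====
def Claim_equal_updown_encrypt : Prop := ∀ (plaintext : String) (num_rows : Int), Dom_updown_encrypt plaintext num_rows → Pre_updown_encrypt plaintext num_rows → Spec_updown_encrypt plaintext num_rows (updown_encrypt plaintext num_rows)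

-- ===== LEMMAS AND PROOFS =====

-- row i of A's finished grid after k columns, characterised directly by cell positions
def pvRowSpec (pt : List Char) (R k i : Nat) : List Char :=
  (List.range k).map (fun c => pt.getD (c * R + (if c % 2 = 0 then i else R - 1 - i)) '%')

lemma pvRowSpec_length (pt : List Char) (R k i : Nat) : (pvRowSpec pt R k i).length = k := by
  simp [pvRowSpec]

lemma pvCeil (n R : Nat) (hR : 0 < R) :
    (if n % R = 0 then n / R else n / R + 1) = (n + R - 1) / R := by
  have hdm := Nat.div_add_mod n R
  have hlt := Nat.mod_lt n hR
  by_cases h0 : n % R = 0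
  · have h2 : (R - 1) / R = 0 := Nat.div_eq_of_lt (by omega)
    have h1 : n + R - 1 = R * (n / R) + (R - 1) := by omega
    rw [if_pos h0, h1, Nat.mul_add_div hR, h2]
    omega
  · have h2 : (n % R - 1) / R = 0 := Nat.div_eq_of_lt (by omega)
    have h1 : n + R - 1 = R * (n / R + 1) + (n % R - 1) := by
      have h3 : R * (n / R + 1) = R * (n / R) + R := by ring
      omega
    rw [if_neg h0, h1, Nat.mul_add_div hR, h2]

lemma pvPadGetD (pt : List Char) (m k : Nat) :
    (pt ++ List.replicate m '%').getD k '%' = pt.getD k '%' := by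
  induction pt generalizing k with
  | nil =>
    simp only [List.nil_append, List.getD_nil]
    simp [List.getD_eq_getElem?_getD, List.getElem?_replicate]
    split <;> rfl
  | cons a t ih =>
    cases k with
    | zero => rfl
    | succ k => simpa using ih k

lemma pvSetMapRange {α : Type} (R j : Nat) (f : Nat → α) (v : α) :
    ((List.range R).map f).set j v = (List.range R).map (fun i => if i = j then v else f i) := by
  apply List.ext_getElem
  · simp
  · intro i h1 h2
    simp only [List.getElem_set, List.getElem_map, List.getElem_range]
    split_ifs with hij hij2 hij2 <;> first | rfl | omega

lemma pvFillStep_eq (pt : List Char) (c row m : Nat) (g : List (List Char)) :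
    pvFillStep c row (g, pt.drop m) =
      (g.set row (PySem.List.insert (g.getD row []) (c : Int) (pt.getD m '%')), pt.drop (m + 1)) := by
  by_cases h : m < pt.length
  · rw [List.drop_eq_getElem_cons h]
    simp [pvFillStep, List.getD_eq_getElem?_getD, List.getElem?_eq_getElem h]
  · have h1 : pt.drop m = [] := by rw [List.drop_eq_nil_iff]; omega
    have h2 : pt.drop (m + 1) = [] := by rw [List.drop_eq_nil_iff]; omega
    have h3 : pt.getD m '%' = '%' := by
      rw [List.getD_eq_getElem?_getD, List.getElem?_eq_none (by omega : pt.length ≤ m)]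
      rfl
    rw [h1, h2, h3]
    rfl

lemma pvInsertRow (pt : List Char) (R c i : Nat) (x : Char) :
    PySem.List.insert (pvRowSpec pt R c i) (c : Int) x = pvRowSpec pt R c i ++ [x] := by
  have h := PySem.List.insert_len (pvRowSpec pt R c i) x
  rwa [PySem.List.len_eq, pvRowSpec_length] at h

lemma pvRowSpec_succ (pt : List Char) (R c i : Nat) :
    pvRowSpec pt R (c + 1) i =
      pvRowSpec pt R c i ++ [pt.getD (c * R + (if c % 2 = 0 then i else R - 1 - i)) '%'] := by
  simp [pvRowSpec, List.range_succ]

lemma pvInnerEven (pt : List Char) (R c : Nat) (hc : c % 2 = 0) :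
    ∀ j, j ≤ R →
    (List.range j).foldl (fun st n => pvFillStep c n st)
        ((List.range R).map (pvRowSpec pt R c), pt.drop (c * R)) =
      ((List.range R).map (fun i => if i < j then pvRowSpec pt R (c + 1) i else pvRowSpec pt R c i),
        pt.drop (c * R + j)) := by
  intro j hj
  induction j with
  | zero => simp
  | succ j ih =>
    rw [List.range_succ, List.foldl_append, ih (by omega)]
    simp only [List.foldl_cons, List.foldl_nil]
    rw [pvFillStep_eq]
    refine Prod.ext ?_ (by rw [show c * R + (j + 1) = c * R + j + 1 from by omega])
    simp only []
    rw [PySem.List.getD_map_range _ _ _ _ (by omega)]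
    simp only [if_neg (lt_irrefl j)]
    rw [pvInsertRow, pvSetMapRange R j]
    apply List.map_congr_left
    intro i _
    by_cases hij : i = j
    · subst hij
      rw [if_pos rfl, if_pos (by omega), pvRowSpec_succ, if_pos hc]
    · rw [if_neg hij]
      by_cases hlt : i < j
      · rw [if_pos hlt, if_pos (by omega)]
      · rw [if_neg hlt, if_neg (by omega)]

lemma pvInnerOdd (pt : List Char) (R c : Nat) (hc : ¬ c % 2 = 0) :
    ∀ j, j ≤ R →
    (List.range j).foldl (fun st n => pvFillStep c (R - 1 - n) st)
        ((List.range R).map (pvRowSpec pt R c), pt.drop (c * R)) =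
      ((List.range R).map (fun i => if R - j ≤ i then pvRowSpec pt R (c + 1) i else pvRowSpec pt R c i),
        pt.drop (c * R + j)) := by
  intro j hj
  induction j with
  | zero =>
    simp only [List.range_zero, List.foldl_nil, Nat.add_zero]
    refine Prod.ext ?_ rfl
    simp only []
    apply List.map_congr_left
    intro i hi
    rw [List.mem_range] at hi
    rw [if_neg (by omega)]
  | succ j ih =>
    rw [List.range_succ, List.foldl_append, ih (by omega)]
    simp only [List.foldl_cons, List.foldl_nil]
    rw [pvFillStep_eq]
    refine Prod.ext ?_ (by rw [show c * R + (j + 1) = c * R + j + 1 from by omega])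
    simp only []
    rw [PySem.List.getD_map_range _ _ _ _ (by omega)]
    rw [if_neg (by omega)]
    rw [pvInsertRow, pvSetMapRange R (R - 1 - j)]
    apply List.map_congr_left
    intro i hi
    rw [List.mem_range] at hi
    by_cases hij : i = R - 1 - j
    · subst hij
      rw [if_pos rfl, if_pos (by omega), pvRowSpec_succ, if_neg hc]
      congr 3
      omega
    · rw [if_neg hij]
      by_cases hge : R - j ≤ i
      · rw [if_pos hge, if_pos (by omega)]
      · rw [if_neg hge, if_neg (by omega)]

lemma pvColStep_eq (pt : List Char) (R c : Nat) :
    pvColStep R ((List.range R).map (pvRowSpec pt R c), pt.drop (c * R)) c =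
      ((List.range R).map (pvRowSpec pt R (c + 1)), pt.drop ((c + 1) * R)) := by
  unfold pvColStep
  by_cases hc : c % 2 = 0
  · rw [if_pos hc, pvInnerEven pt R c hc R le_rfl]
    refine Prod.ext ?_ (by rw [show (c + 1) * R = c * R + R from by ring])
    simp only []
    apply List.map_congr_left
    intro i hi
    rw [List.mem_range] at hi
    rw [if_pos hi]
  · rw [if_neg hc, pvInnerOdd pt R c hc R le_rfl]
    refine Prod.ext ?_ (by rw [show (c + 1) * R = c * R + R from by ring])
    simp only []
    apply List.map_congr_left
    intro i hi
    rw [List.mem_range] at hi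
    rw [if_pos (by omega)]

lemma pvGrid (pt : List Char) (R : Nat) :
    ∀ k, (List.range k).foldl (pvColStep R) (List.replicate R [], pt) =
      ((List.range R).map (pvRowSpec pt R k), pt.drop (k * R)) := by
  intro k
  induction k with
  | zero =>
    refine Prod.ext ?_ (by simp)
    simp only [List.range_zero, List.foldl_nil]
    have : (List.range R).map (pvRowSpec pt R 0) = (List.range R).map (fun _ => ([] : List Char)) := by
      apply List.map_congr_left; intro i _; simp [pvRowSpec]
    rw [this]
    simp
  | succ k ih =>
    rw [List.range_succ, List.foldl_append, ih]
    simp only [List.foldl_cons, List.foldl_nil]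
    exact pvColStep_eq pt R k

lemma pvDoubleFold (R C : Nat) (g h : Nat → Nat → Char)
    (hgh : ∀ i, i < R → ∀ j, j < C → g i j = h i j) :
    (List.range R).foldl (fun acc i => (List.range C).foldl (fun acc j => acc ++ [g i j]) acc) [] =
    (List.range R).foldl (fun acc i => (List.range C).foldl (fun acc j => acc ++ [h i j]) acc) [] := by
  have inner : ∀ (f : Nat → Nat → Char) (acc : List Char) (i : Nat),
      (List.range C).foldl (fun acc j => acc ++ [f i j]) acc = acc ++ (List.range C).map (f i) :=
    fun f acc i => PySem.List.foldl_append_singleton_eq_map (f i) _ acc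
  simp only [inner]
  rw [PySem.List.foldl_append_eq_flatMap, PySem.List.foldl_append_eq_flatMap]
  simp only [List.nil_append]
  apply List.flatMap_congr
  intro i hi
  rw [List.mem_range] at hi
  apply List.map_congr_left
  intro j hj
  rw [List.mem_range] at hj
  exact hgh i hi j hj

theorem updown_encrypt_spec : Claim_equal_updown_encrypt := by
  intro p r _ hpre
  unfold Spec_updown_encrypt
  unfold updown_encrypt updown_encrypt_alt
  by_cases hneg : r < 0
  · simp [hneg]
  · rw [if_neg hneg, if_neg hneg]
    by_cases hlen : p.toList.length = 0
    · rw [if_pos hlen, if_pos hlen]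
    · rw [if_neg hlen, if_neg hlen]
      have hr0 : r ≠ 0 := by
        rcases hpre with h | h
        · exact h
        · exact absurd h hlen
      have hrpos : 0 < r := by omega
      obtain ⟨R, rfl⟩ : ∃ R : Nat, r = (R : Int) := ⟨r.toNat, by omega⟩
      have hR : 0 < R := by exact_mod_cast hrpos
      simp only [PySem.List.len_eq, Int.toNat_natCast]
      set n := p.toList.length with hn
      have hn1 : 0 < n := Nat.pos_of_ne_zero hlen
      set C := (n + R - 1) / R with hC
      have hCA : (if PySem.Int.mod (n : Int) (R : Int) = 0 then PySem.Int.floordiv (n : Int) (R : Int)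
          else PySem.Int.floordiv (n : Int) (R : Int) + 1).toNat = C := by
        rw [PySem.Int.mod_natCast, PySem.Int.floordiv_natCast, hC, ← pvCeil n R hR]
        by_cases h0 : n % R = 0
        · rw [if_pos (by exact_mod_cast h0), if_pos h0, Int.toNat_natCast]
        · rw [if_neg (by exact_mod_cast h0), if_neg h0,
            show ((n / R : Nat) : Int) + 1 = ((n / R + 1 : Nat) : Int) from by norm_cast,
            Int.toNat_natCast]
      have hCB : (PySem.Int.floordiv ((n : Int) + (R : Int) - 1) (R : Int)).toNat = C := by
        rw [show ((n : Int) + (R : Int) - 1) = ((n + R - 1 : Nat) : Int) from by omega,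
          PySem.Int.floordiv_natCast, Int.toNat_natCast, hC]
      rw [hCA, hCB, pvGrid]
      apply congrArg String.mk
      apply pvDoubleFold R C
      intro i hi j hj
      simp only [PySem.List.pyGetD_natCast]
      rw [PySem.List.getD_map_range _ _ _ _ hi]
      unfold pvRowSpec
      rw [PySem.List.getD_map_range _ _ _ _ hj, pvPadGetD]
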